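-- pv_equiv track=rewrite | github.com/cute-cirno/LeetCode | Normal/HW-Q8-DP.py | divide_mooncake
-- ===== SOURCE A (Python) =====
-- def divide_mooncake(m, n):
--     dp = [[[0 for _ in range(n + 1)] for _ in range(n + 1)] for _ in range(m + 1)]
--
--     # 初始化dp表，只有一个员工时的情况
--     for k in range(1, n + 1):
--         dp[1][k][k] = 1
--
--     # 填充dp表
--     for i in range(2, m + 1):
--         for j in range(i, n + 1):
--             for k in range(1, j):
--                 for l in range(max(1, k - 3), k + 1):
--                     dp[i][j][k] += dp[i - 1][j - k][l]
--
--     # 计算总的分配方案数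
--     ans = sum(dp[m][n][i] for i in range(1, n + 1))
--     return ans
-- ===== SOURCE B (Python) =====
-- def divide_mooncake(m, n):
--     # forward sparse DP: cur maps (j, k) -> number of ways for the employees so far
--     # to receive j cakes in total with the last one getting k
--     cur = {}
--     for k in range(1, n + 1):
--         cur[(k, k)] = 1
--     for _ in range(2, m + 1):
--         nxt = {}
--         for (j, k), v in cur.items():
--             for k2 in range(k, k + 4):
--                 if j + k2 <= n:
--                     nxt[(j + k2, k2)] = nxt.get((j + k2, k2), 0) + v
--         cur = nxt
--     return sum(cur.get((n, k), 0) for k in range(1, n + 1))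
-- ===== Notes on version B (the rewrite author's own statement) =====
-- stated objective: alternative
-- what changed: Replaces A's full bottom-up 3D table (allocating and filling every (i,j,k) cell) by an iterative forward ('scatter') DP over sparse dicts: each layer pushes only the reachable (total, last-part) states to their at most 4 successors, so unreachable cells are never allocated or visited; intended as faster (one probe measured 7x at sizes where A times out) but not confirmed at every size.
import Mathlib
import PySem

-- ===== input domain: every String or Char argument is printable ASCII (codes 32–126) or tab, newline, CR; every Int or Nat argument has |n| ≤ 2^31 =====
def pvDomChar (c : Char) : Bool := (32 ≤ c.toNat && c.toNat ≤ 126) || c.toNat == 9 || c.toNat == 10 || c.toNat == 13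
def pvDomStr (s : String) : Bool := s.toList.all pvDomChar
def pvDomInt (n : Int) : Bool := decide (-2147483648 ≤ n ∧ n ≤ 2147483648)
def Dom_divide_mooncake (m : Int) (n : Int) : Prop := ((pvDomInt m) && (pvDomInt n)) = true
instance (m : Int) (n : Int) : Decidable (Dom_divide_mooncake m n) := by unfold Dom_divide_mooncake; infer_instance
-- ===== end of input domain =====

-- B replaces A's bottom-up 3D table (every cell allocated and filled) by an iterative
-- forward ("scatter") DP over sparse dicts of reachable (total, last-part) states.

-- ===== PORT A =====
-- Indexing helpers: all indices A ever reads/writes come from `range`, hence are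
-- nonnegative and in range on Pre_, where `.toNat` + `getD`/`set` is exact Python indexing.
def get3 (dp : List (List (List Int))) (i j k : Int) : Int :=
  ((dp.getD i.toNat []).getD j.toNat []).getD k.toNat 0

def set3 (dp : List (List (List Int))) (i j k : Int) (v : Int) : List (List (List Int)) :=
  dp.set i.toNat ((dp.getD i.toNat []).set j.toNat
    (((dp.getD i.toNat []).getD j.toNat []).set k.toNat v))

def divide_mooncake (m : Int) (n : Int) : Int :=
  let dp0 := (PySem.List.pyRange 0 (m+1) 1).map (fun _ =>
      (PySem.List.pyRange 0 (n+1) 1).map (fun _ =>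
        (PySem.List.pyRange 0 (n+1) 1).map (fun _ => (0 : Int))))
  let dp1 := (PySem.List.pyRange 1 (n+1) 1).foldl (fun dp k => set3 dp 1 k k 1) dp0
  let dp2 := (PySem.List.pyRange 2 (m+1) 1).foldl (fun dp i =>
      (PySem.List.pyRange i (n+1) 1).foldl (fun dp j =>
        (PySem.List.pyRange 1 j 1).foldl (fun dp k =>
          (PySem.List.pyRange (max 1 (k-3)) (k+1) 1).foldl (fun dp l =>
            set3 dp i j k (get3 dp i j k + get3 dp (i-1) (j-k) l)) dp) dp) dp) dp1
  (PySem.List.pyRange 1 (n+1) 1).foldl (fun acc i => acc + get3 dp2 m n i) 0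

-- ===== PORT B =====
-- one forward ("scatter") step: push every cached state (j,k) of the previous layer
-- onto its successors (j+k2, k2), k2 in [k, k+3], keeping only totals j+k2 <= n
def mcStep (n : Int) (cur : PySem.Dict (Int × Int) Int) : PySem.Dict (Int × Int) Int :=
  cur.items.foldl (fun nxt p =>
    (PySem.List.pyRange p.1.2 (p.1.2 + 4) 1).foldl (fun nxt k2 =>
      if p.1.1 + k2 ≤ n then
        nxt.insert (p.1.1 + k2, k2) (nxt.getD (p.1.1 + k2, k2) 0 + p.2)
      else nxt) nxt) PySem.Dict.empty

def divide_mooncake_alt (m : Int) (n : Int) : Int :=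
  let cur0 := (PySem.List.pyRange 1 (n+1) 1).foldl
    (fun d k => d.insert (k, k) 1) PySem.Dict.empty
  let curF := (PySem.List.pyRange 2 (m+1) 1).foldl (fun cur _ => mcStep n cur) cur0
  (PySem.List.pyRange 1 (n+1) 1).foldl (fun acc k => acc + curF.getD (n, k) 0) 0

-- ===== PRECONDITION & SPEC =====
-- Pre_ excludes exactly the inputs where A raises IndexError (m ≤ 0 with n ≥ 1: `dp[1]`
-- does not exist); everywhere else A returns normally.
def Pre_divide_mooncake (m : Int) (n : Int) : Prop := 1 ≤ m ∨ n ≤ 0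
instance (m : Int) (n : Int) : Decidable (Pre_divide_mooncake m n) := by
  unfold Pre_divide_mooncake; infer_instance
def pvWitness_divide_mooncake : Int × Int := (3, 5)

def Spec_divide_mooncake (m : Int) (n : Int) (out : Int) : Prop := out = divide_mooncake_alt m n
instance (m : Int) (n : Int) (out : Int) : Decidable (Spec_divide_mooncake m n out) := by
  unfold Spec_divide_mooncake; infer_instance

-- ===== CLAIM (what is proved, stated in full; the proofs are below) =====
def Claim_equal_divide_mooncake : Prop := ∀ (m : Int) (n : Int), Dom_divide_mooncake m n →
  Pre_divide_mooncake m n → Spec_divide_mooncake m n (divide_mooncake m n)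

-- ===== LEMMAS AND PROOFS =====

-- The common mathematical recurrence, by recursion on i (as a Nat).
def fRecN : Nat → Int → Int → Int
  | 0, _, _ => 0
  | 1, j, k => if k < 1 ∨ j < k then 0 else if j = k then 1 else 0
  | (iN+2), j, k => if k < 1 ∨ j < k then 0
      else ((PySem.List.pyRange (max 1 (k-3)) (k+1) 1).map (fun l => fRecN (iN+1) (j-k) l)).sum

def fRec (i j k : Int) : Int := fRecN i.toNat j k

theorem fRec_neg {i : Int} (h : i < 1) (j k : Int) : fRec i j k = 0 := by
  unfold fRec
  have : i.toNat = 0 := by omega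
  rw [this]; rfl

theorem fRec_one (j k : Int) :
    fRec 1 j k = if k < 1 ∨ j < k then 0 else if j = k then 1 else 0 := rfl

theorem fRec_ge2 {i : Int} (h : 2 ≤ i) (j k : Int) :
    fRec i j k = if k < 1 ∨ j < k then 0
      else ((PySem.List.pyRange (max 1 (k-3)) (k+1) 1).map (fun l => fRec (i-1) (j-k) l)).sum := by
  obtain ⟨iN, hiN⟩ : ∃ iN, i.toNat = iN + 2 := ⟨i.toNat - 2, by omega⟩
  have h1 : (i-1).toNat = iN + 1 := by omega
  unfold fRec
  rw [hiN, h1]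
  rfl

theorem fRec_zero_of_lt {i j k : Int} (h : j < k ∨ k < 1) : fRec i j k = 0 := by
  unfold fRec
  rcases hn : i.toNat with _ | t
  · rfl
  · rcases t with _ | t
    · show (if k < 1 ∨ j < k then (0:Int) else _) = 0
      rw [if_pos (by omega)]
    · show (if k < 1 ∨ j < k then (0:Int) else _) = 0
      rw [if_pos (by omega)]

theorem fRec_zero_of_small (i j k : Int) (h : j < i) : fRec i j k = 0 := by
  by_cases h1 : i < 1
  · exact fRec_neg h1 j k
  by_cases h2 : i = 1
  · subst h2
    rw [fRec_one, if_pos (by omega)]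
  · have h3 : 2 ≤ i := by omega
    rw [fRec_ge2 h3]
    split_ifs with h4
    · rfl
    · apply List.sum_eq_zero
      intro x hx
      simp only [List.mem_map] at hx
      obtain ⟨l, _, rfl⟩ := hx
      exact fRec_zero_of_small (i-1) (j-k) l (by omega)
termination_by i.toNat
decreasing_by omega

theorem fRec_diag {i : Int} (h : 2 ≤ i) (j : Int) : fRec i j j = 0 := by
  rw [fRec_ge2 h]
  split_ifs with h4
  · rfl
  · apply List.sum_eq_zero
    intro x hx
    simp only [List.mem_map] at hx
    obtain ⟨l, hl, rfl⟩ := hx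
    rw [PySem.List.mem_pyRange_one] at hl
    have hsub : j - j = 0 := by omega
    rw [hsub]
    exact fRec_zero_of_lt (by omega)

-- ----- A-side: the 3D table -----

def Shaped (m n : Int) (dp : List (List (List Int))) : Prop :=
  dp.length = (m+1).toNat ∧
  ∀ r ∈ dp, r.length = (n+1).toNat ∧ ∀ c ∈ r, c.length = (n+1).toNat

theorem row_spec (m n : Int) (dp : List (List (List Int))) (hs : Shaped m n dp)
    (i : Int) (h0 : 0 ≤ i) (h1 : i ≤ m) :
    (dp.getD i.toNat []).length = (n+1).toNat ∧
    ∀ c ∈ dp.getD i.toNat [], c.length = (n+1).toNat := by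
  have hlt : i.toNat < dp.length := by rw [hs.1]; omega
  have hg : dp.getD i.toNat [] = dp[i.toNat] := by
    rw [List.getD_eq_getElem?_getD, List.getElem?_eq_getElem hlt]; rfl
  rw [hg]
  exact hs.2 _ (List.getElem_mem hlt)

theorem col_spec (m n : Int) (dp : List (List (List Int))) (hs : Shaped m n dp)
    (i j : Int) (hi0 : 0 ≤ i) (hi1 : i ≤ m) (hj0 : 0 ≤ j) (hj1 : j ≤ n) :
    ((dp.getD i.toNat []).getD j.toNat []).length = (n+1).toNat := by
  have hr := row_spec m n dp hs i hi0 hi1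
  have hlt : j.toNat < (dp.getD i.toNat []).length := by rw [hr.1]; omega
  have hg : (dp.getD i.toNat []).getD j.toNat [] = (dp.getD i.toNat [])[j.toNat] := by
    rw [List.getD_eq_getElem?_getD, List.getElem?_eq_getElem hlt]; rfl
  rw [hg]
  exact hr.2 _ (List.getElem_mem hlt)

theorem shaped_set3 (m n : Int) (dp : List (List (List Int))) (hs : Shaped m n dp)
    (i j k v : Int) (hi0 : 0 ≤ i) (hi1 : i ≤ m) (hj0 : 0 ≤ j) (hj1 : j ≤ n)
    (hk0 : 0 ≤ k) (hk1 : k ≤ n) :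
    Shaped m n (set3 dp i j k v) := by
  unfold set3
  refine ⟨by rw [List.length_set]; exact hs.1, ?_⟩
  intro r hr
  rcases List.mem_or_eq_of_mem_set hr with h | h
  · exact hs.2 r h
  · subst h
    have hr' := row_spec m n dp hs i hi0 hi1
    refine ⟨by rw [List.length_set]; exact hr'.1, ?_⟩
    intro c hc
    rcases List.mem_or_eq_of_mem_set hc with h' | h'
    · exact hr'.2 c h'
    · subst h'
      rw [List.length_set]
      exact col_spec m n dp hs i j hi0 hi1 hj0 hj1

theorem get3_set3 (m n : Int) (dp : List (List (List Int))) (hs : Shaped m n dp)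
    (i j k v x y z : Int) (hi0 : 0 ≤ i) (hi1 : i ≤ m) (hj0 : 0 ≤ j) (hj1 : j ≤ n)
    (hk0 : 0 ≤ k) (hk1 : k ≤ n) (hx : 0 ≤ x) (hy : 0 ≤ y) (hz : 0 ≤ z) :
    get3 (set3 dp i j k v) x y z
      = if x = i ∧ y = j ∧ z = k then v else get3 dp x y z := by
  have hilt : i.toNat < dp.length := by rw [hs.1]; omega
  have hjlt : j.toNat < (dp.getD i.toNat []).length := by
    rw [(row_spec m n dp hs i hi0 hi1).1]; omega
  have hklt : k.toNat < ((dp.getD i.toNat []).getD j.toNat []).length := by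
    rw [col_spec m n dp hs i j hi0 hi1 hj0 hj1]; omega
  unfold get3 set3
  by_cases hxi : x = i
  · subst hxi
    have hrow : ((dp.set x.toNat ((dp.getD x.toNat []).set j.toNat
        (((dp.getD x.toNat []).getD j.toNat []).set k.toNat v))).getD x.toNat [])
        = (dp.getD x.toNat []).set j.toNat
            (((dp.getD x.toNat []).getD j.toNat []).set k.toNat v) := by
      rw [List.getD_eq_getElem?_getD, List.getElem?_set_self hilt]; rfl
    rw [hrow]
    by_cases hyj : y = j
    · subst hyj
      have hcol : (((dp.getD x.toNat []).set y.toNat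
          (((dp.getD x.toNat []).getD y.toNat []).set k.toNat v)).getD y.toNat [])
          = ((dp.getD x.toNat []).getD y.toNat []).set k.toNat v := by
        rw [List.getD_eq_getElem?_getD, List.getElem?_set_self hjlt]; rfl
      rw [hcol]
      by_cases hzk : z = k
      · subst hzk
        rw [if_pos ⟨rfl, rfl, rfl⟩]
        rw [List.getD_eq_getElem?_getD, List.getElem?_set_self hklt]; rfl
      · rw [if_neg (by tauto)]
        have hne : k.toNat ≠ z.toNat := by omega
        have hlast : (((dp.getD x.toNat []).getD y.toNat []).set k.toNat v).getD z.toNat 0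
            = ((dp.getD x.toNat []).getD y.toNat []).getD z.toNat 0 := by
          rw [List.getD_eq_getElem?_getD, List.getElem?_set_ne hne,
              ← List.getD_eq_getElem?_getD]
        rw [hlast]
    · rw [if_neg (by tauto)]
      have hne : j.toNat ≠ y.toNat := by omega
      have hmid : ((dp.getD x.toNat []).set j.toNat
          (((dp.getD x.toNat []).getD j.toNat []).set k.toNat v)).getD y.toNat []
          = (dp.getD x.toNat []).getD y.toNat [] := by
        rw [List.getD_eq_getElem?_getD, List.getElem?_set_ne hne,
            ← List.getD_eq_getElem?_getD]
      rw [hmid]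
  · rw [if_neg (by tauto)]
    have hne : i.toNat ≠ x.toNat := by omega
    have houter : (dp.set i.toNat ((dp.getD i.toNat []).set j.toNat
        (((dp.getD i.toNat []).getD j.toNat []).set k.toNat v))).getD x.toNat []
        = dp.getD x.toNat [] := by
      rw [List.getD_eq_getElem?_getD, List.getElem?_set_ne hne,
          ← List.getD_eq_getElem?_getD]
    rw [houter]

theorem shaped_dp0 (m n : Int) :
    Shaped m n ((PySem.List.pyRange 0 (m+1) 1).map (fun _ =>
      (PySem.List.pyRange 0 (n+1) 1).map (fun _ =>
        (PySem.List.pyRange 0 (n+1) 1).map (fun _ => (0 : Int))))) := by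
  refine ⟨by simp [PySem.List.length_pyRange_one], ?_⟩
  intro r hr
  simp only [List.mem_map] at hr
  obtain ⟨_, _, rfl⟩ := hr
  refine ⟨by simp [PySem.List.length_pyRange_one], ?_⟩
  intro c hc
  simp only [List.mem_map] at hc
  obtain ⟨_, _, rfl⟩ := hc
  simp [PySem.List.length_pyRange_one]

theorem getD_prop {α : Type} (P : α → Prop) (l : List α) (n : Nat) (d : α)
    (hd : P d) (h : ∀ x ∈ l, P x) : P (l.getD n d) := by
  rw [List.getD_eq_getElem?_getD]
  cases hx : l[n]? with
  | none => exact hd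
  | some a => exact h a (List.mem_of_getElem? hx)

theorem get3_dp0 (m n x y z : Int) :
    get3 ((PySem.List.pyRange 0 (m+1) 1).map (fun _ =>
      (PySem.List.pyRange 0 (n+1) 1).map (fun _ =>
        (PySem.List.pyRange 0 (n+1) 1).map (fun _ => (0 : Int))))) x y z = 0 := by
  unfold get3
  refine getD_prop (fun (r : List (List Int)) => (r.getD y.toNat []).getD z.toNat 0 = 0) _ _ _ ?_ ?_
  · simp
  · intro r hr
    simp only [List.mem_map] at hr
    obtain ⟨_, _, rfl⟩ := hr
    refine getD_prop (fun (c : List Int) => c.getD z.toNat 0 = 0) _ _ _ ?_ ?_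
    · simp
    · intro c hc
      simp only [List.mem_map] at hc
      obtain ⟨_, _, rfl⟩ := hc
      refine getD_prop (fun (w : Int) => w = 0) _ _ _ ?_ ?_
      · rfl
      · intro w hw
        simp only [List.mem_map] at hw
        obtain ⟨_, _, rfl⟩ := hw
        rfl

theorem initLoop (m n : Int) (hm : 1 ≤ m) :
    ∀ (cnt : Nat) (lo : Int) (dp : List (List (List Int))),
    (n+1-lo).toNat = cnt → 1 ≤ lo → Shaped m n dp →
    Shaped m n ((PySem.List.pyRange lo (n+1) 1).foldl (fun dp k => set3 dp 1 k k 1) dp) ∧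
    (∀ x y z : Int, 0 ≤ x → x ≤ m → 0 ≤ y → y ≤ n → 0 ≤ z → z ≤ n →
      get3 ((PySem.List.pyRange lo (n+1) 1).foldl (fun dp k => set3 dp 1 k k 1) dp) x y z
        = if x = 1 ∧ y = z ∧ lo ≤ z then 1 else get3 dp x y z) := by
  intro cnt
  induction cnt with
  | zero =>
    intro lo dp hcnt hlo hs
    rw [PySem.List.pyRange_one_eq_nil (by omega)]
    simp only [List.foldl_nil]
    refine ⟨hs, ?_⟩
    intro x y z _ _ _ _ _ hz1
    rw [if_neg (by omega)]
  | succ cnt IH =>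
    intro lo dp hcnt hlo hs
    have hlt : lo < n + 1 := by omega
    rw [PySem.List.pyRange_one_cons hlt]
    simp only [List.foldl_cons]
    have hs' : Shaped m n (set3 dp 1 lo lo 1) :=
      shaped_set3 m n dp hs 1 lo lo 1 (by omega) hm (by omega) (by omega) (by omega) (by omega)
    have hIH := IH (lo+1) (set3 dp 1 lo lo 1) (by omega) (by omega) hs'
    refine ⟨hIH.1, ?_⟩
    intro x y z hx0 hx1 hy0 hy1 hz0 hz1
    rw [hIH.2 x y z hx0 hx1 hy0 hy1 hz0 hz1,
        get3_set3 m n dp hs 1 lo lo 1 x y z (by omega) hm (by omega) (by omega)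
          (by omega) (by omega) hx0 hy0 hz0]
    split_ifs <;> omega

theorem fillL (m n i j k : Int) (h2 : 2 ≤ i) (him : i ≤ m) (hij : i ≤ j) (hjn : j ≤ n)
    (hk1 : 1 ≤ k) (hkj : k < j) :
    ∀ (cnt : Nat) (lo : Int) (dp : List (List (List Int))),
    (k+1-lo).toNat = cnt → 1 ≤ lo → Shaped m n dp →
    Shaped m n ((PySem.List.pyRange lo (k+1) 1).foldl (fun dp l =>
      set3 dp i j k (get3 dp i j k + get3 dp (i-1) (j-k) l)) dp) ∧
    (∀ x y z : Int, 0 ≤ x → x ≤ m → 0 ≤ y → y ≤ n → 0 ≤ z → z ≤ n →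
      get3 ((PySem.List.pyRange lo (k+1) 1).foldl (fun dp l =>
          set3 dp i j k (get3 dp i j k + get3 dp (i-1) (j-k) l)) dp) x y z
        = if x = i ∧ y = j ∧ z = k then
            get3 dp i j k
              + ((PySem.List.pyRange lo (k+1) 1).map (fun l => get3 dp (i-1) (j-k) l)).sum
          else get3 dp x y z) := by
  intro cnt
  induction cnt with
  | zero =>
    intro lo dp hcnt hlo hs
    rw [PySem.List.pyRange_one_eq_nil (by omega)]
    simp only [List.foldl_nil, List.map_nil, List.sum_nil]
    refine ⟨hs, ?_⟩
    intro x y z _ _ _ _ _ _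
    split_ifs with h
    · obtain ⟨rfl, rfl, rfl⟩ := h; ring
    · rfl
  | succ cnt IH =>
    intro lo dp hcnt hlo hs
    have hlt : lo < k + 1 := by omega
    rw [PySem.List.pyRange_one_cons hlt]
    simp only [List.foldl_cons]
    set dp' := set3 dp i j k (get3 dp i j k + get3 dp (i-1) (j-k) lo) with hdp'
    have hb : (0:Int) ≤ i ∧ 0 ≤ j ∧ 0 ≤ k ∧ k ≤ n := by omega
    have hs' : Shaped m n dp' :=
      shaped_set3 m n dp hs i j k _ (by omega) him (by omega) hjn (by omega) (by omega)
    have hIH := IH (lo+1) dp' (by omega) (by omega) hs'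
    refine ⟨hIH.1, ?_⟩
    intro x y z hx0 hx1 hy0 hy1 hz0 hz1
    rw [hIH.2 x y z hx0 hx1 hy0 hy1 hz0 hz1]
    have hget : ∀ x y z : Int, 0 ≤ x → 0 ≤ y → 0 ≤ z →
        get3 dp' x y z = if x = i ∧ y = j ∧ z = k then
          get3 dp i j k + get3 dp (i-1) (j-k) lo else get3 dp x y z := fun x y z hx hy hz =>
      get3_set3 m n dp hs i j k _ x y z (by omega) him (by omega) hjn (by omega) (by omega)
        hx hy hz
    have hmap : (PySem.List.pyRange (lo+1) (k+1) 1).map (fun l => get3 dp' (i-1) (j-k) l)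
        = (PySem.List.pyRange (lo+1) (k+1) 1).map (fun l => get3 dp (i-1) (j-k) l) := by
      apply List.map_congr_left
      intro l hl
      rw [PySem.List.mem_pyRange_one] at hl
      rw [hget (i-1) (j-k) l (by omega) (by omega) (by omega), if_neg (by omega)]
    split_ifs with hcell
    · obtain ⟨rfl, rfl, rfl⟩ := hcell
      rw [hmap, hget x y z hx0 hy0 hz0, if_pos ⟨rfl, rfl, rfl⟩,
          List.map_cons, List.sum_cons]
      ring
    · rw [hget x y z hx0 hy0 hz0, if_neg hcell]

theorem fillK (m n i j : Int) (h2 : 2 ≤ i) (him : i ≤ m) (hij : i ≤ j) (hjn : j ≤ n) :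
    ∀ (cnt : Nat) (lo : Int) (dp : List (List (List Int))),
    (j-lo).toNat = cnt → 1 ≤ lo → Shaped m n dp →
    (∀ y z : Int, 0 ≤ y → y ≤ n → 0 ≤ z → z ≤ n → get3 dp (i-1) y z = fRec (i-1) y z) →
    (∀ z : Int, lo ≤ z → z ≤ n → get3 dp i j z = 0) →
    Shaped m n ((PySem.List.pyRange lo j 1).foldl (fun dp k =>
      (PySem.List.pyRange (max 1 (k-3)) (k+1) 1).foldl (fun dp l =>
        set3 dp i j k (get3 dp i j k + get3 dp (i-1) (j-k) l)) dp) dp) ∧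
    (∀ x y z : Int, 0 ≤ x → x ≤ m → 0 ≤ y → y ≤ n → 0 ≤ z → z ≤ n →
      get3 ((PySem.List.pyRange lo j 1).foldl (fun dp k =>
          (PySem.List.pyRange (max 1 (k-3)) (k+1) 1).foldl (fun dp l =>
            set3 dp i j k (get3 dp i j k + get3 dp (i-1) (j-k) l)) dp) dp) x y z
        = if x = i ∧ y = j ∧ lo ≤ z ∧ z < j then fRec i j z else get3 dp x y z) := by
  intro cnt
  induction cnt with
  | zero =>
    intro lo dp hcnt hlo hs hprev hz
    rw [PySem.List.pyRange_one_eq_nil (by omega)]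
    simp only [List.foldl_nil]
    refine ⟨hs, ?_⟩
    intro x y z _ _ _ _ _ _
    rw [if_neg (by omega)]
  | succ cnt IH =>
    intro lo dp hcnt hlo hs hprev hz
    have hlt : lo < j := by omega
    rw [PySem.List.pyRange_one_cons hlt]
    simp only [List.foldl_cons]
    have hL := fillL m n i j lo h2 him hij hjn hlo hlt
      ((lo + 1 - max 1 (lo-3)).toNat) (max 1 (lo-3)) dp rfl (by omega) hs
    set dp' := (PySem.List.pyRange (max 1 (lo-3)) (lo+1) 1).foldl (fun dp l =>
      set3 dp i j lo (get3 dp i j lo + get3 dp (i-1) (j-lo) l)) dp with hdp'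
    have hget : ∀ x y z : Int, 0 ≤ x → x ≤ m → 0 ≤ y → y ≤ n → 0 ≤ z → z ≤ n →
        get3 dp' x y z = if x = i ∧ y = j ∧ z = lo then fRec i j lo else get3 dp x y z := by
      intro x y z hx0 hx1 hy0 hy1 hz0 hz1
      rw [hL.2 x y z hx0 hx1 hy0 hy1 hz0 hz1]
      split_ifs with hc
      · rw [hz lo (by omega) (by omega)]
        have hmap : (PySem.List.pyRange (max 1 (lo-3)) (lo+1) 1).map
              (fun l => get3 dp (i-1) (j-lo) l)
            = (PySem.List.pyRange (max 1 (lo-3)) (lo+1) 1).map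
              (fun l => fRec (i-1) (j-lo) l) := by
          apply List.map_congr_left
          intro l hl
          rw [PySem.List.mem_pyRange_one] at hl
          exact hprev (j-lo) l (by omega) (by omega) (by omega) (by omega)
        rw [hmap, fRec_ge2 h2, if_neg (by omega)]
        ring
      · rfl
    have hIH := IH (lo+1) dp' (by omega) (by omega) hL.1
      (fun y z hy0 hy1 hz0 hz1 => by
        rw [hget (i-1) y z (by omega) (by omega) hy0 hy1 hz0 hz1, if_neg (by omega)]
        exact hprev y z hy0 hy1 hz0 hz1)
      (fun z hz0 hz1 => by
        rw [hget i j z (by omega) him (by omega) hjn (by omega) hz1, if_neg (by omega)]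
        exact hz z (by omega) hz1)
    refine ⟨hIH.1, ?_⟩
    intro x y z hx0 hx1 hy0 hy1 hz0 hz1
    rw [hIH.2 x y z hx0 hx1 hy0 hy1 hz0 hz1]
    by_cases hC2 : x = i ∧ y = j ∧ lo ≤ z ∧ z < j
    · rw [if_pos hC2]
      by_cases hC1 : lo + 1 ≤ z
      · rw [if_pos ⟨hC2.1, hC2.2.1, hC1, hC2.2.2.2⟩]
      · have hzlo : z = lo := by omega
        rw [if_neg (by omega), hget x y z hx0 hx1 hy0 hy1 hz0 hz1,
            if_pos ⟨hC2.1, hC2.2.1, hzlo⟩, hzlo]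
    · rw [if_neg hC2, if_neg (by omega), hget x y z hx0 hx1 hy0 hy1 hz0 hz1,
          if_neg (by omega)]

theorem fillJ (m n i : Int) (h2 : 2 ≤ i) (him : i ≤ m) :
    ∀ (cnt : Nat) (lo : Int) (dp : List (List (List Int))),
    (n+1-lo).toNat = cnt → i ≤ lo → Shaped m n dp →
    (∀ y z : Int, 0 ≤ y → y ≤ n → 0 ≤ z → z ≤ n → get3 dp (i-1) y z = fRec (i-1) y z) →
    (∀ y z : Int, lo ≤ y → y ≤ n → 0 ≤ z → z ≤ n → get3 dp i y z = 0) →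
    Shaped m n ((PySem.List.pyRange lo (n+1) 1).foldl (fun dp j =>
      (PySem.List.pyRange 1 j 1).foldl (fun dp k =>
        (PySem.List.pyRange (max 1 (k-3)) (k+1) 1).foldl (fun dp l =>
          set3 dp i j k (get3 dp i j k + get3 dp (i-1) (j-k) l)) dp) dp) dp) ∧
    (∀ x y z : Int, 0 ≤ x → x ≤ m → 0 ≤ y → y ≤ n → 0 ≤ z → z ≤ n →
      get3 ((PySem.List.pyRange lo (n+1) 1).foldl (fun dp j =>
          (PySem.List.pyRange 1 j 1).foldl (fun dp k =>
            (PySem.List.pyRange (max 1 (k-3)) (k+1) 1).foldl (fun dp l =>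
              set3 dp i j k (get3 dp i j k + get3 dp (i-1) (j-k) l)) dp) dp) dp) x y z
        = if x = i ∧ lo ≤ y ∧ y ≤ n ∧ 1 ≤ z ∧ z < y then fRec i y z else get3 dp x y z) := by
  intro cnt
  induction cnt with
  | zero =>
    intro lo dp hcnt hlo hs hprev hz
    rw [PySem.List.pyRange_one_eq_nil (by omega)]
    simp only [List.foldl_nil]
    refine ⟨hs, ?_⟩
    intro x y z _ _ _ _ _ _
    rw [if_neg (by omega)]
  | succ cnt IH =>
    intro lo dp hcnt hlo hs hprev hz
    have hlt : lo < n + 1 := by omega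
    rw [PySem.List.pyRange_one_cons hlt]
    simp only [List.foldl_cons]
    have hK := fillK m n i lo h2 him hlo (by omega)
      ((lo - 1).toNat) 1 dp (by omega) (by omega) hs hprev
      (fun z hz0 hz1 => hz lo z (by omega) (by omega) (by omega) hz1)
    set dp' := (PySem.List.pyRange 1 lo 1).foldl (fun dp k =>
      (PySem.List.pyRange (max 1 (k-3)) (k+1) 1).foldl (fun dp l =>
        set3 dp i lo k (get3 dp i lo k + get3 dp (i-1) (lo-k) l)) dp) dp with hdp'
    have hget : ∀ x y z : Int, 0 ≤ x → x ≤ m → 0 ≤ y → y ≤ n → 0 ≤ z → z ≤ n →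
        get3 dp' x y z
          = if x = i ∧ y = lo ∧ 1 ≤ z ∧ z < lo then fRec i lo z else get3 dp x y z := by
      intro x y z hx0 hx1 hy0 hy1 hz0 hz1
      rw [hK.2 x y z hx0 hx1 hy0 hy1 hz0 hz1]
    have hIH := IH (lo+1) dp' (by omega) (by omega) hK.1
      (fun y z hy0 hy1 hz0 hz1 => by
        rw [hget (i-1) y z (by omega) (by omega) hy0 hy1 hz0 hz1, if_neg (by omega)]
        exact hprev y z hy0 hy1 hz0 hz1)
      (fun y z hy0 hy1 hz0 hz1 => by
        rw [hget i y z (by omega) him (by omega) hy1 hz0 hz1, if_neg (by omega)]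
        exact hz y z (by omega) hy1 hz0 hz1)
    refine ⟨hIH.1, ?_⟩
    intro x y z hx0 hx1 hy0 hy1 hz0 hz1
    rw [hIH.2 x y z hx0 hx1 hy0 hy1 hz0 hz1]
    by_cases hC2 : x = i ∧ lo ≤ y ∧ y ≤ n ∧ 1 ≤ z ∧ z < y
    · rw [if_pos hC2]
      by_cases hC1 : lo + 1 ≤ y
      · rw [if_pos ⟨hC2.1, hC1, hC2.2.2.1, hC2.2.2.2.1, hC2.2.2.2.2⟩]
      · have hylo : y = lo := by omega
        rw [if_neg (by omega), hget x y z hx0 hx1 hy0 hy1 hz0 hz1,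
            if_pos ⟨hC2.1, hylo, hC2.2.2.2.1, by omega⟩, hylo]
    · rw [if_neg hC2, if_neg (by omega), hget x y z hx0 hx1 hy0 hy1 hz0 hz1,
          if_neg (by omega)]

theorem fillI (m n : Int) (hm : 1 ≤ m) :
    ∀ (cnt : Nat) (t : Int) (dp : List (List (List Int))),
    (m+1-t).toNat = cnt → 2 ≤ t → t ≤ m+1 → Shaped m n dp →
    (∀ x y z : Int, 0 ≤ x → x ≤ m → 0 ≤ y → y ≤ n → 0 ≤ z → z ≤ n →
      get3 dp x y z = if x < t then fRec x y z else 0) →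
    (∀ x y z : Int, 0 ≤ x → x ≤ m → 0 ≤ y → y ≤ n → 0 ≤ z → z ≤ n →
      get3 ((PySem.List.pyRange t (m+1) 1).foldl (fun dp i =>
        (PySem.List.pyRange i (n+1) 1).foldl (fun dp j =>
          (PySem.List.pyRange 1 j 1).foldl (fun dp k =>
            (PySem.List.pyRange (max 1 (k-3)) (k+1) 1).foldl (fun dp l =>
              set3 dp i j k (get3 dp i j k + get3 dp (i-1) (j-k) l)) dp) dp) dp) dp) x y z
        = fRec x y z) := by
  intro cnt
  induction cnt with
  | zero =>
    intro t dp hcnt h2t htm hs hP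
    rw [PySem.List.pyRange_one_eq_nil (by omega)]
    simp only [List.foldl_nil]
    intro x y z hx0 hx1 hy0 hy1 hz0 hz1
    rw [hP x y z hx0 hx1 hy0 hy1 hz0 hz1, if_pos (by omega)]
  | succ cnt IH =>
    intro t dp hcnt h2t htm hs hP
    have hlt : t < m + 1 := by omega
    rw [PySem.List.pyRange_one_cons hlt]
    simp only [List.foldl_cons]
    have hJ := fillJ m n t h2t (by omega)
      ((n + 1 - t).toNat) t dp rfl (le_refl t) hs
      (fun y z hy0 hy1 hz0 hz1 => by
        rw [hP (t-1) y z (by omega) (by omega) hy0 hy1 hz0 hz1, if_pos (by omega)])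
      (fun y z hty hy1 hz0 hz1 => by
        rw [hP t y z (by omega) (by omega) (by omega) hy1 hz0 hz1, if_neg (by omega)])
    set dp' := (PySem.List.pyRange t (n+1) 1).foldl (fun dp j =>
      (PySem.List.pyRange 1 j 1).foldl (fun dp k =>
        (PySem.List.pyRange (max 1 (k-3)) (k+1) 1).foldl (fun dp l =>
          set3 dp t j k (get3 dp t j k + get3 dp (t-1) (j-k) l)) dp) dp) dp with hdp'
    apply IH (t+1) dp' (by omega) (by omega) (by omega) hJ.1
    intro x y z hx0 hx1 hy0 hy1 hz0 hz1
    rw [hJ.2 x y z hx0 hx1 hy0 hy1 hz0 hz1]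
    by_cases hC : x = t ∧ t ≤ y ∧ y ≤ n ∧ 1 ≤ z ∧ z < y
    · rw [if_pos hC, if_pos (by omega), hC.1]
    · rw [if_neg hC, hP x y z hx0 hx1 hy0 hy1 hz0 hz1]
      by_cases hxt : x < t
      · rw [if_pos hxt, if_pos (by omega)]
      · rw [if_neg hxt]
        by_cases hxe : x = t
        · rw [if_pos (by omega)]
          subst hxe
          by_cases hy : y < x
          · exact (fRec_zero_of_small x y z hy).symm
          · by_cases hz1' : z < 1
            · exact (fRec_zero_of_lt (Or.inr hz1')).symm
            · by_cases hzy : y < z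
              · exact (fRec_zero_of_lt (Or.inl hzy)).symm
              · have hzy' : z = y := by omega
                rw [hzy']
                exact (fRec_diag h2t y).symm
        · rw [if_neg (by omega)]

-- ----- B-side: the sparse forward DP -----

theorem keys_insert_sub {κv : Type} [BEq κv] [LawfulBEq κv] (d : PySem.Dict κv Int) (k : κv)
    (v : Int) (x : κv) (h : x ∈ (d.insert k v).keys) : x = k ∨ x ∈ d.keys := by
  cases hc : d.contains k with
  | true =>
    rw [PySem.Dict.keys_insert_of_contains d v hc] at h
    exact Or.inr h
  | false =>
    rw [PySem.Dict.keys_insert_of_not_contains d v hc] at h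
    rcases List.mem_append.mp h with h | h
    · exact Or.inr h
    · exact Or.inl (by simpa using h)

theorem sum_ind_pyRange (a b x v : Int) :
    ((PySem.List.pyRange a b 1).map (fun l => if l = x then v else 0)).sum
      = if a ≤ x ∧ x < b then v else 0 := by
  have key : ∀ cnt : Nat, ∀ a : Int, (b - a).toNat = cnt →
      ((PySem.List.pyRange a b 1).map (fun l => if l = x then v else 0)).sum
        = if a ≤ x ∧ x < b then v else 0 := by
    intro cnt
    induction cnt with
    | zero =>
      intro a hcnt
      rw [PySem.List.pyRange_one_eq_nil (by omega)]
      simp only [List.map_nil, List.sum_nil]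
      rw [if_neg (by omega)]
    | succ cnt IH =>
      intro a hcnt
      rw [PySem.List.pyRange_one_cons (by omega), List.map_cons, List.sum_cons,
          IH (a+1) (by omega)]
      split_ifs <;> omega
  exact key (b - a).toNat a rfl

theorem sum_map_add (R : List Int) (g h : Int → Int) :
    (R.map (fun l => g l + h l)).sum = (R.map g).sum + (R.map h).sum := by
  induction R with
  | nil => simp
  | cons r t IH =>
    simp only [List.map_cons, List.sum_cons, IH]
    ring

theorem sum_swap (L : List ((Int × Int) × Int)) (R : List Int)
    (f : (Int × Int) × Int → Int → Int) :
    (L.map (fun p => (R.map (f p)).sum)).sum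
      = (R.map (fun l => (L.map (fun p => f p l)).sum)).sum := by
  induction L with
  | nil =>
    simp
  | cons p L IHL =>
    simp only [List.map_cons, List.sum_cons, IHL]
    rw [sum_map_add R (f p) (fun l => (L.map (fun p => f p l)).sum)]

theorem items_sum_at_key_zero (l : List ((Int × Int) × Int)) (κ : Int × Int)
    (h : κ ∉ l.map Prod.fst) :
    (l.map (fun p => if p.1 = κ then p.2 else 0)).sum = 0 := by
  induction l with
  | nil => rfl
  | cons p t IH =>
    simp only [List.map_cons, List.sum_cons]
    have h1 : p.1 ≠ κ := by
      intro hh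
      apply h
      rw [List.map_cons, hh]
      exact List.mem_cons_self
    have h2 : κ ∉ t.map Prod.fst := by
      intro hh
      apply h
      rw [List.map_cons]
      exact List.mem_cons_of_mem _ hh
    rw [if_neg h1, IH h2]
    ring

theorem items_sum_at_key_list (l : List ((Int × Int) × Int)) (κ : Int × Int)
    (hnd : (l.map Prod.fst).Nodup) :
    (l.map (fun p => if p.1 = κ then p.2 else 0)).sum = (PySem.Dict.mk l).getD κ 0 := by
  induction l with
  | nil => simp [PySem.Dict.getD, PySem.Dict.get?]
  | cons p t IH =>
    obtain ⟨pk, pv⟩ := p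
    simp only [List.map_cons, List.sum_cons]
    have hgd : (PySem.Dict.mk ((pk, pv) :: t)).getD κ 0
        = if pk == κ then pv else (PySem.Dict.mk t).getD κ 0 := by
      simp only [PySem.Dict.getD, PySem.Dict.get?_mk_cons]
      split_ifs <;> rfl
    rw [List.map_cons, List.nodup_cons] at hnd
    by_cases hk : pk = κ
    · rw [hgd, if_pos (by simpa using hk)]
      have hnot : κ ∉ t.map Prod.fst := by
        rw [← hk]
        exact hnd.1
      rw [items_sum_at_key_zero t κ hnot]
      simp [hk]
    · rw [hgd, if_neg (by simpa using hk), ← IH hnd.2]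
      simp [hk]

theorem items_sum_at_key (d : PySem.Dict (Int × Int) Int) (κ : Int × Int)
    (hnd : d.keys.Nodup) :
    (d.items.map (fun p => if p.1 = κ then p.2 else 0)).sum = d.getD κ 0 := by
  obtain ⟨l⟩ := d
  apply items_sum_at_key_list
  simpa [PySem.Dict.keys] using hnd

theorem scatter_inner (n j v : Int) (R : List Int)
    (nxt : PySem.Dict (Int × Int) Int) (q : Int × Int) :
    ((R.foldl (fun nxt k2 => if j + k2 ≤ n then
        nxt.insert (j + k2, k2) (nxt.getD (j + k2, k2) 0 + v)
      else nxt) nxt).getD q 0)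
      = nxt.getD q 0
        + (R.map (fun k2 => if q = (j + k2, k2) ∧ j + k2 ≤ n then v else 0)).sum := by
  induction R generalizing nxt with
  | nil => simp
  | cons k2 t IH =>
    simp only [List.foldl_cons, List.map_cons, List.sum_cons]
    by_cases hg : j + k2 ≤ n
    · rw [if_pos hg, IH, PySem.Dict.getD_insert]
      by_cases hq : q = (j + k2, k2)
      · rw [if_pos hq, if_pos ⟨hq, hg⟩, ← hq]
        ring
      · rw [if_neg hq, if_neg (fun h => hq h.1)]
        ring
    · rw [if_neg hg, IH, if_neg (fun h => hg h.2)]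
      ring

theorem scatter_outer (n : Int) (L : List ((Int × Int) × Int))
    (nxt : PySem.Dict (Int × Int) Int) (q : Int × Int) :
    ((L.foldl (fun nxt p =>
        (PySem.List.pyRange p.1.2 (p.1.2 + 4) 1).foldl (fun nxt k2 =>
          if p.1.1 + k2 ≤ n then
            nxt.insert (p.1.1 + k2, k2) (nxt.getD (p.1.1 + k2, k2) 0 + p.2)
          else nxt) nxt) nxt).getD q 0)
      = nxt.getD q 0
        + (L.map (fun p => ((PySem.List.pyRange p.1.2 (p.1.2 + 4) 1).map
            (fun k2 => if q = (p.1.1 + k2, k2) ∧ p.1.1 + k2 ≤ n then p.2 else 0)).sum)).sum := by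
  induction L generalizing nxt with
  | nil => simp
  | cons p t IH =>
    simp only [List.foldl_cons, List.map_cons, List.sum_cons]
    rw [IH, scatter_inner]
    ring

theorem pyRange_four (a : Int) :
    PySem.List.pyRange a (a + 4) 1 = [a, a + 1, a + 2, a + 3] := by
  rw [PySem.List.pyRange_one_cons (by omega), PySem.List.pyRange_one_cons (by omega),
      PySem.List.pyRange_one_cons (by omega), PySem.List.pyRange_one_cons (by omega),
      PySem.List.pyRange_one_eq_nil (by omega)]
  norm_num
  constructor <;> ring

theorem contrib_lhs (n : Int) (q : Int × Int) (j0 a v : Int) (hq : q.1 ≤ n) :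
    ((PySem.List.pyRange a (a + 4) 1).map
        (fun k2 => if q = (j0 + k2, k2) ∧ j0 + k2 ≤ n then v else 0)).sum
      = if j0 = q.1 - q.2 ∧ a ≤ q.2 ∧ q.2 ≤ a + 3 then v else 0 := by
  rw [pyRange_four]
  simp only [List.map_cons, List.map_nil, List.sum_cons, List.sum_nil, Prod.ext_iff]
  obtain ⟨q1, q2⟩ := q
  simp only []
  split_ifs <;> omega

theorem contrib_rhs (q : Int × Int) (j0 a v : Int) (ha : 1 ≤ a) :
    ((PySem.List.pyRange (max 1 (q.2 - 3)) (q.2 + 1) 1).map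
        (fun l => if (j0, a) = (q.1 - q.2, l) then v else 0)).sum
      = if j0 = q.1 - q.2 ∧ a ≤ q.2 ∧ q.2 ≤ a + 3 then v else 0 := by
  by_cases hj : j0 = q.1 - q.2
  · have hcongr : ∀ l : Int,
        (if (j0, a) = (q.1 - q.2, l) then v else 0) = (if l = a then v else 0) := by
      intro l
      simp only [Prod.ext_iff]
      split_ifs <;> first | rfl | omega
    simp only [hcongr]
    rw [sum_ind_pyRange]
    split_ifs <;> omega
  · have hcongr : ∀ l : Int,
        (if (j0, a) = (q.1 - q.2, l) then v else 0) = (0 : Int) := by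
      intro l
      rw [if_neg (by simp only [Prod.ext_iff]; intro h; exact hj h.1)]
    simp only [hcongr]
    rw [List.sum_eq_zero (by intro x hx; simp only [List.mem_map] at hx; obtain ⟨_, _, rfl⟩ := hx; rfl),
        if_neg (by intro h; exact hj h.1)]

theorem mcStep_getD (n : Int) (cur : PySem.Dict (Int × Int) Int)
    (hK : ∀ p ∈ cur.items, 1 ≤ p.1.2) (hnd : cur.keys.Nodup)
    (q : Int × Int) (hq : q.1 ≤ n) :
    (mcStep n cur).getD q 0
      = ((PySem.List.pyRange (max 1 (q.2 - 3)) (q.2 + 1) 1).map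
          (fun l => cur.getD (q.1 - q.2, l) 0)).sum := by
  unfold mcStep
  rw [scatter_outer, PySem.Dict.getD_empty]
  have hmap1 : cur.items.map (fun p => ((PySem.List.pyRange p.1.2 (p.1.2 + 4) 1).map
      (fun k2 => if q = (p.1.1 + k2, k2) ∧ p.1.1 + k2 ≤ n then p.2 else 0)).sum)
      = cur.items.map (fun p => ((PySem.List.pyRange (max 1 (q.2 - 3)) (q.2 + 1) 1).map
          (fun l => if p.1 = (q.1 - q.2, l) then p.2 else 0)).sum) := by
    apply List.map_congr_left
    intro p hp
    rw [contrib_lhs n q p.1.1 p.1.2 p.2 hq, ← contrib_rhs q p.1.1 p.1.2 p.2 (hK p hp)]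
  rw [hmap1, sum_swap cur.items _ (fun p l => if p.1 = (q.1 - q.2, l) then p.2 else 0)]
  have hmap2 : (PySem.List.pyRange (max 1 (q.2 - 3)) (q.2 + 1) 1).map
      (fun l => (cur.items.map (fun p => if p.1 = (q.1 - q.2, l) then p.2 else 0)).sum)
      = (PySem.List.pyRange (max 1 (q.2 - 3)) (q.2 + 1) 1).map
        (fun l => cur.getD (q.1 - q.2, l) 0) := by
    apply List.map_congr_left
    intro l _
    exact items_sum_at_key cur (q.1 - q.2, l) hnd
  rw [hmap2]
  ring

theorem fold_keys_inner (n j v : Int) (R : List Int) (hR : ∀ k2 ∈ R, 1 ≤ k2) :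
    ∀ (nxt : PySem.Dict (Int × Int) Int), ∀ κ ∈ (R.foldl (fun nxt k2 =>
      if j + k2 ≤ n then nxt.insert (j + k2, k2) (nxt.getD (j + k2, k2) 0 + v)
      else nxt) nxt).keys, κ ∈ nxt.keys ∨ (1 ≤ κ.2 ∧ κ.1 ≤ n) := by
  induction R with
  | nil => intro nxt κ hκ; exact Or.inl hκ
  | cons k2 t IH =>
    intro nxt κ hκ
    simp only [List.foldl_cons] at hκ
    by_cases hg : j + k2 ≤ n
    · rw [if_pos hg] at hκ
      rcases IH (fun x hx => hR x (List.mem_cons_of_mem _ hx)) _ κ hκ with h | h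
      · rcases keys_insert_sub _ _ _ _ h with h' | h'
        · right
          rw [h']
          exact ⟨hR k2 List.mem_cons_self, hg⟩
        · exact Or.inl h'
      · exact Or.inr h
    · rw [if_neg hg] at hκ
      exact IH (fun x hx => hR x (List.mem_cons_of_mem _ hx)) _ κ hκ

theorem fold_nodup_inner (n j v : Int) (R : List Int) :
    ∀ (nxt : PySem.Dict (Int × Int) Int), nxt.keys.Nodup → (R.foldl (fun nxt k2 =>
      if j + k2 ≤ n then nxt.insert (j + k2, k2) (nxt.getD (j + k2, k2) 0 + v)
      else nxt) nxt).keys.Nodup := by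
  induction R with
  | nil => intro nxt h; exact h
  | cons k2 t IH =>
    intro nxt h
    simp only [List.foldl_cons]
    by_cases hg : j + k2 ≤ n
    · rw [if_pos hg]
      exact IH _ (PySem.Dict.nodup_keys_insert _ _ _ h)
    · rw [if_neg hg]
      exact IH _ h

theorem mcStep_keys (n : Int) (cur : PySem.Dict (Int × Int) Int)
    (hK : ∀ p ∈ cur.items, 1 ≤ p.1.2) :
    ∀ κ ∈ (mcStep n cur).keys, 1 ≤ κ.2 ∧ κ.1 ≤ n := by
  unfold mcStep
  have main : ∀ (L : List ((Int × Int) × Int)), (∀ p ∈ L, 1 ≤ p.1.2) →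
      ∀ (nxt : PySem.Dict (Int × Int) Int), ∀ κ ∈ (L.foldl (fun nxt p =>
        (PySem.List.pyRange p.1.2 (p.1.2 + 4) 1).foldl (fun nxt k2 =>
          if p.1.1 + k2 ≤ n then
            nxt.insert (p.1.1 + k2, k2) (nxt.getD (p.1.1 + k2, k2) 0 + p.2)
          else nxt) nxt) nxt).keys, κ ∈ nxt.keys ∨ (1 ≤ κ.2 ∧ κ.1 ≤ n) := by
    intro L
    induction L with
    | nil => intro _ nxt κ hκ; exact Or.inl hκ
    | cons p t IH =>
      intro hL nxt κ hκ
      simp only [List.foldl_cons] at hκ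
      rcases IH (fun x hx => hL x (List.mem_cons_of_mem _ hx)) _ κ hκ with h | h
      · have hran : ∀ k2 ∈ PySem.List.pyRange p.1.2 (p.1.2 + 4) 1, (1:Int) ≤ k2 := by
          intro k2 hk2
          rw [PySem.List.mem_pyRange_one] at hk2
          have := hL p List.mem_cons_self
          omega
        exact fold_keys_inner n p.1.1 p.2 _ hran nxt κ h
      · exact Or.inr h
  intro κ hκ
  rcases main cur.items hK PySem.Dict.empty κ hκ with h | h
  · rw [PySem.Dict.keys_empty] at h
    exact absurd h (List.not_mem_nil)
  · exact h

theorem mcStep_nodup (n : Int) (cur : PySem.Dict (Int × Int) Int) :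
    (mcStep n cur).keys.Nodup := by
  unfold mcStep
  have main : ∀ (L : List ((Int × Int) × Int)) (nxt : PySem.Dict (Int × Int) Int),
      nxt.keys.Nodup → (L.foldl (fun nxt p =>
        (PySem.List.pyRange p.1.2 (p.1.2 + 4) 1).foldl (fun nxt k2 =>
          if p.1.1 + k2 ≤ n then
            nxt.insert (p.1.1 + k2, k2) (nxt.getD (p.1.1 + k2, k2) 0 + p.2)
          else nxt) nxt) nxt).keys.Nodup := by
    intro L
    induction L with
    | nil => intro nxt h; exact h
    | cons p t IH =>
      intro nxt h
      simp only [List.foldl_cons]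
      exact IH _ (fold_nodup_inner n p.1.1 p.2 _ nxt h)
  exact main cur.items PySem.Dict.empty PySem.Dict.nodup_keys_empty

theorem mcStep_fRec (n i : Int) (h2 : 2 ≤ i) (cur : PySem.Dict (Int × Int) Int)
    (hK : ∀ κ ∈ cur.keys, (1:Int) ≤ κ.2) (hnd : cur.keys.Nodup)
    (hV : ∀ j k : Int, j ≤ n → cur.getD (j, k) 0 = fRec (i-1) j k) :
    ∀ j k : Int, j ≤ n → (mcStep n cur).getD (j, k) 0 = fRec i j k := by
  intro j k hj
  have hKitems : ∀ p ∈ cur.items, (1:Int) ≤ p.1.2 := by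
    intro p hp
    apply hK p.1
    simp only [PySem.Dict.keys]
    exact List.mem_map_of_mem hp
  rw [mcStep_getD n cur hKitems hnd (j, k) hj]
  by_cases hk1 : k < 1
  · rw [PySem.List.pyRange_one_eq_nil (by omega), fRec_zero_of_lt (Or.inr hk1)]
    rfl
  · have hmap : (PySem.List.pyRange (max 1 ((j,k).2 - 3)) ((j,k).2 + 1) 1).map
        (fun l => cur.getD ((j,k).1 - (j,k).2, l) 0)
        = (PySem.List.pyRange (max 1 (k - 3)) (k + 1) 1).map
          (fun l => fRec (i-1) (j-k) l) := by
      apply List.map_congr_left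
      intro l _
      exact hV (j-k) l (by omega)
    rw [hmap]
    by_cases hjk : j < k
    · rw [fRec_zero_of_lt (Or.inl hjk)]
      apply List.sum_eq_zero
      intro x hx
      simp only [List.mem_map] at hx
      obtain ⟨l, hl, rfl⟩ := hx
      rw [PySem.List.mem_pyRange_one] at hl
      exact fRec_zero_of_lt (Or.inl (by omega))
    · rw [fRec_ge2 h2, if_neg (by omega)]

theorem cur0_spec (n : Int) : ∀ (cnt : Nat) (lo : Int) (d : PySem.Dict (Int × Int) Int),
    (n+1-lo).toNat = cnt →
    ((∀ q : Int × Int, ((PySem.List.pyRange lo (n+1) 1).foldl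
        (fun d k => d.insert (k, k) 1) d).getD q 0
        = if q.1 = q.2 ∧ lo ≤ q.1 ∧ q.1 ≤ n then 1 else d.getD q 0)
     ∧ (∀ κ ∈ ((PySem.List.pyRange lo (n+1) 1).foldl
        (fun d k => d.insert (k, k) 1) d).keys,
          κ ∈ d.keys ∨ (κ.1 = κ.2 ∧ lo ≤ κ.1 ∧ κ.1 ≤ n))
     ∧ (d.keys.Nodup → ((PySem.List.pyRange lo (n+1) 1).foldl
        (fun d k => d.insert (k, k) 1) d).keys.Nodup)) := by
  intro cnt
  induction cnt with
  | zero =>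
    intro lo d hcnt
    rw [PySem.List.pyRange_one_eq_nil (by omega)]
    simp only [List.foldl_nil]
    exact ⟨fun q => by rw [if_neg (by omega)], fun κ h => Or.inl h, fun h => h⟩
  | succ cnt IH =>
    intro lo d hcnt
    rw [PySem.List.pyRange_one_cons (by omega)]
    simp only [List.foldl_cons]
    have hIH := IH (lo+1) (d.insert (lo, lo) 1) (by omega)
    refine ⟨?_, ?_, ?_⟩
    · intro q
      rw [hIH.1 q, PySem.Dict.getD_insert]
      obtain ⟨q1, q2⟩ := q
      simp only [Prod.ext_iff]
      split_ifs <;> omega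
    · intro κ hκ
      rcases hIH.2.1 κ hκ with h | h
      · rcases keys_insert_sub _ _ _ _ h with h' | h'
        · right
          rw [h']
          exact ⟨rfl, by omega, by omega⟩
        · exact Or.inl h'
      · right
        exact ⟨h.1, by omega, h.2.2⟩
    · intro h
      exact hIH.2.2 (PySem.Dict.nodup_keys_insert _ _ _ h)

theorem layers (m n : Int) : ∀ (cnt : Nat) (t : Int) (cur : PySem.Dict (Int × Int) Int),
    (m+1-t).toNat = cnt → 2 ≤ t → t ≤ m+1 →
    (∀ j k : Int, j ≤ n → cur.getD (j, k) 0 = fRec (t-1) j k) →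
    (∀ κ ∈ cur.keys, (1:Int) ≤ κ.2) → cur.keys.Nodup →
    ∀ j k : Int, j ≤ n →
      ((PySem.List.pyRange t (m+1) 1).foldl (fun cur _ => mcStep n cur) cur).getD (j, k) 0
        = fRec m j k := by
  intro cnt
  induction cnt with
  | zero =>
    intro t cur hcnt h2 htm hV _ _ j k hj
    rw [PySem.List.pyRange_one_eq_nil (by omega)]
    simp only [List.foldl_nil]
    rw [hV j k hj]
    congr 1
    omega
  | succ cnt IH =>
    intro t cur hcnt h2 htm hV hK hnd j k hj
    rw [PySem.List.pyRange_one_cons (by omega)]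
    simp only [List.foldl_cons]
    have hKitems : ∀ p ∈ cur.items, (1:Int) ≤ p.1.2 := by
      intro p hp
      apply hK p.1
      simp only [PySem.Dict.keys]
      exact List.mem_map_of_mem hp
    have hV' : ∀ j k : Int, j ≤ n → (mcStep n cur).getD (j, k) 0 = fRec ((t+1)-1) j k := by
      intro j k hj
      have := mcStep_fRec n t h2 cur hK hnd hV j k hj
      rw [this]
      congr 1
      omega
    exact IH (t+1) (mcStep n cur) (by omega) (by omega) (by omega) hV'
      (fun κ hκ => (mcStep_keys n cur hKitems κ hκ).1) (mcStep_nodup n cur) j k hj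

theorem alt_eq_sum (m n : Int) (hm : 1 ≤ m) (hn : 1 ≤ n) :
    divide_mooncake_alt m n
      = ((PySem.List.pyRange 1 (n+1) 1).map (fun k => fRec m n k)).sum := by
  unfold divide_mooncake_alt
  simp only []
  have h0 := cur0_spec n n.toNat 1 PySem.Dict.empty (by omega)
  have hbase : ∀ j k : Int, j ≤ n →
      ((PySem.List.pyRange 1 (n+1) 1).foldl
        (fun d k => d.insert (k, k) ((1:Int))) PySem.Dict.empty).getD (j, k) 0
        = fRec ((2:Int)-1) j k := by
    intro j k hj
    rw [h0.1 (j, k)]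
    have h21 : ((2:Int)-1) = 1 := by norm_num
    rw [h21, fRec_one, PySem.Dict.getD_empty]
    simp only []
    split_ifs <;> omega
  have hkeys0 : ∀ κ ∈ ((PySem.List.pyRange 1 (n+1) 1).foldl
      (fun d k => d.insert (k, k) ((1:Int))) PySem.Dict.empty).keys, (1:Int) ≤ κ.2 := by
    intro κ hκ
    rcases h0.2.1 κ hκ with h | h
    · rw [PySem.Dict.keys_empty] at h
      exact absurd h (List.not_mem_nil)
    · omega
  have hnd0 := h0.2.2 PySem.Dict.nodup_keys_empty
  have hF := layers m n ((m-1).toNat) 2 _ (by omega) (by omega) (by omega)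
    hbase hkeys0 hnd0
  rw [PySem.List.foldl_add]
  have hmapeq : (PySem.List.pyRange 1 (n+1) 1).map (fun k =>
      ((PySem.List.pyRange 2 (m+1) 1).foldl (fun cur _ => mcStep n cur)
        ((PySem.List.pyRange 1 (n+1) 1).foldl
          (fun d k => d.insert (k, k) ((1:Int))) PySem.Dict.empty)).getD (n, k) 0)
      = (PySem.List.pyRange 1 (n+1) 1).map (fun k => fRec m n k) := by
    apply List.map_congr_left
    intro k _
    exact hF n k (le_refl n)
  rw [hmapeq]
  ring

-- ===== VERDICT (by name: the statement is the Claim_ definition above) =====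
theorem divide_mooncake_spec : Claim_equal_divide_mooncake := by
  unfold Claim_equal_divide_mooncake Spec_divide_mooncake Pre_divide_mooncake
  intro m n _ hpre
  by_cases hn : n ≤ 0
  · unfold divide_mooncake divide_mooncake_alt
    rw [PySem.List.pyRange_one_eq_nil (by omega : n + 1 ≤ 1)]
    simp
  · have hn1 : (1:Int) ≤ n := by omega
    have hm : (1:Int) ≤ m := by omega
    rw [alt_eq_sum m n hm hn1]
    unfold divide_mooncake
    simp only []
    have hdp1 := initLoop m n hm n.toNat 1 _ (by omega) (by omega) (shaped_dp0 m n)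
    have hP2 : ∀ x y z : Int, 0 ≤ x → x ≤ m → 0 ≤ y → y ≤ n → 0 ≤ z → z ≤ n →
        get3 ((PySem.List.pyRange 1 (n+1) 1).foldl (fun dp k => set3 dp 1 k k 1)
          ((PySem.List.pyRange 0 (m+1) 1).map (fun _ =>
            (PySem.List.pyRange 0 (n+1) 1).map (fun _ =>
              (PySem.List.pyRange 0 (n+1) 1).map (fun _ => (0 : Int)))))) x y z
          = if x < 2 then fRec x y z else 0 := by
      intro x y z hx0 hx1 hy0 hy1 hz0 hz1
      rw [hdp1.2 x y z hx0 hx1 hy0 hy1 hz0 hz1, get3_dp0]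
      by_cases hx : x = 1 ∧ y = z ∧ 1 ≤ z
      · rw [if_pos hx, if_pos (by omega)]
        obtain ⟨hx1', hyz, hz1'⟩ := hx
        rw [hx1', fRec_one, if_neg (by omega), if_pos hyz]
      · rw [if_neg hx]
        by_cases hlt2 : x < 2
        · rw [if_pos hlt2]
          by_cases hx1' : x = 1
          · rw [hx1', fRec_one]
            split_ifs with g1 g2
            · rfl
            · omega
            · rfl
          · have hx0' : x = 0 := by omega
            rw [hx0']
            exact (fRec_neg (by omega) y z).symm
        · rw [if_neg hlt2]
    have hfin := fillI m n hm ((m-1).toNat) 2 _ (by omega) (by omega) (by omega) hdp1.1 hP2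
    rw [PySem.List.foldl_add]
    have hmapeq :
        (PySem.List.pyRange 1 (n+1) 1).map (fun i =>
          get3 ((PySem.List.pyRange 2 (m+1) 1).foldl (fun dp i =>
            (PySem.List.pyRange i (n+1) 1).foldl (fun dp j =>
              (PySem.List.pyRange 1 j 1).foldl (fun dp k =>
                (PySem.List.pyRange (max 1 (k-3)) (k+1) 1).foldl (fun dp l =>
                  set3 dp i j k (get3 dp i j k + get3 dp (i-1) (j-k) l)) dp) dp) dp)
            ((PySem.List.pyRange 1 (n+1) 1).foldl (fun dp k => set3 dp 1 k k 1)
              ((PySem.List.pyRange 0 (m+1) 1).map (fun _ =>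
                (PySem.List.pyRange 0 (n+1) 1).map (fun _ =>
                  (PySem.List.pyRange 0 (n+1) 1).map (fun _ => (0 : Int))))))) m n i)
        = (PySem.List.pyRange 1 (n+1) 1).map (fun k => fRec m n k) := by
      apply List.map_congr_left
      intro l hl
      rw [PySem.List.mem_pyRange_one] at hl
      exact hfin m n l (by omega) (le_refl m) (by omega) (le_refl n) (by omega) (by omega)
    rw [hmapeq]
    ring
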